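-- pv_equiv track=rewrite | github.com/IagoBGCarvalho/Algoritmos-e-Programacao-de-Computadores | Questionário 07 - Funções/questao11.py | stockmarket
-- ===== SOURCE A (Python) =====
-- def stockmarket(lista_de_blocos_de_acoes):
--     valores_por_data = {}
--
--     for bloco_de_acao in lista_de_blocos_de_acoes:
--         data_de_compra = bloco_de_acao[0]
--         preco_de_compra = bloco_de_acao[1]
--         numero_de_acoes = bloco_de_acao[2]
--         valor_gasto_nesta_compra = preco_de_compra * numero_de_acoes
--
--         if data_de_compra in valores_por_data:
--             valores_por_data[data_de_compra] += valor_gasto_nesta_compra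
--         else:
--             valores_por_data[data_de_compra] = valor_gasto_nesta_compra
--
--     return valores_por_data
-- ===== SOURCE B (Python) =====
-- def stockmarket(lista_de_blocos_de_acoes):
--     # One dict comprehension: for each date key, sum price*shares over the
--     # matching blocks of the whole list (nested scans instead of A's single
--     # accumulating pass; first-occurrence key order is preserved).
--     return {data: sum(preco * numero
--                       for d, preco, numero in lista_de_blocos_de_acoes
--                       if d == data)
--             for data, _, _ in lista_de_blocos_de_acoes}
-- ===== Notes on version B (the rewrite author's own statement) =====
-- stated objective: simpler
-- what changed: Replaces A's single accumulating pass over a mutable dict (membership test, then += or initial assignment) with a one-line dict comprehension that, for each date, sums price*shares over all matching blocks of the list.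
import Mathlib
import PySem

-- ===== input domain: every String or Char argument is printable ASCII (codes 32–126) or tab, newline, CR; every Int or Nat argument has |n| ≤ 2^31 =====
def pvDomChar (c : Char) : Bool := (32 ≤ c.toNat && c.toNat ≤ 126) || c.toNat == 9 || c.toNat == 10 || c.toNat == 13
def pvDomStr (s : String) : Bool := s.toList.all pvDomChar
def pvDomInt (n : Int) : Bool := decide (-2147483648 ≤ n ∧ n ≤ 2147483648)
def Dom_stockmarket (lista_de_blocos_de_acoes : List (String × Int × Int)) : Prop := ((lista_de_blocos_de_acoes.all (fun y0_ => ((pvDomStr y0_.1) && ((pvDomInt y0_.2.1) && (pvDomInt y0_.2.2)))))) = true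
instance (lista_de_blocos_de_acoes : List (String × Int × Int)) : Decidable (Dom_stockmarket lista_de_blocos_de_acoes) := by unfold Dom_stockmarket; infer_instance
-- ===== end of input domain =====

-- B replaces A's single accumulating dict pass with a dict comprehension that sums
-- price*shares over the matching blocks per date (simpler one-liner; not faster).


-- ===== PORT A =====
def stockmarket (lista_de_blocos_de_acoes : List (String × Int × Int)) : List (String × Int) :=
  (lista_de_blocos_de_acoes.foldl
    (fun valores_por_data bloco_de_acao =>
      let data_de_compra := bloco_de_acao.1
      let valor_gasto_nesta_compra := bloco_de_acao.2.1 * bloco_de_acao.2.2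
      if valores_por_data.contains data_de_compra then
        -- valores_por_data[data] += valor : read the current value, store back in place
        valores_por_data.insert data_de_compra
          (valores_por_data.getD data_de_compra 0 + valor_gasto_nesta_compra)
      else
        valores_por_data.insert data_de_compra valor_gasto_nesta_compra)
    PySem.Dict.empty).items

-- ===== PORT B =====
def stockmarket_alt (lista_de_blocos_de_acoes : List (String × Int × Int)) : List (String × Int) :=
  -- dict comprehension: keys in first-occurrence order, value = sum over matching blocks
  (lista_de_blocos_de_acoes.foldl
    (fun d b =>
      d.insert b.1
        (((lista_de_blocos_de_acoes.filter (fun c => c.1 == b.1)).map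
            (fun c => c.2.1 * c.2.2)).sum))
    PySem.Dict.empty).items

-- ===== PRECONDITION & SPEC =====
def Spec_stockmarket (lista_de_blocos_de_acoes : List (String × Int × Int)) (out : List (String × Int)) : Prop := out = stockmarket_alt lista_de_blocos_de_acoes
instance (lista_de_blocos_de_acoes : List (String × Int × Int)) (out : List (String × Int)) : Decidable (Spec_stockmarket lista_de_blocos_de_acoes out) := by unfold Spec_stockmarket; infer_instance

-- ===== CLAIM (what is proved, stated in full; the proofs are below) =====
def Claim_equal_stockmarket : Prop := ∀ (lista_de_blocos_de_acoes : List (String × Int × Int)), Dom_stockmarket lista_de_blocos_de_acoes → Spec_stockmarket lista_de_blocos_de_acoes (stockmarket lista_de_blocos_de_acoes)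

-- ===== LEMMAS AND PROOFS =====

-- total spending for one date over a list of blocks (B's inner sum)
def pvSum (k : String) (l : List (String × Int × Int)) : Int :=
  ((l.filter (fun c => c.1 == k)).map (fun c => c.2.1 * c.2.2)).sum

-- the canonical association list: first-occurrence dates, each paired through g
def pvCanon (l : List (String × Int × Int)) (g : String → Int) : List (String × Int) :=
  (PySem.List.dedup (l.map (·.1))).map (fun k => (k, g k))

lemma pvCanon_keys (l : List (String × Int × Int)) (g : String → Int) :
    (pvCanon l g).map (·.1) = PySem.List.dedup (l.map (·.1)) := by
  simp [pvCanon, List.map_map, Function.comp_def]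

lemma pvSum_append_singleton (k : String) (l : List (String × Int × Int))
    (b : String × Int × Int) :
    pvSum k (l ++ [b]) = pvSum k l + (if b.1 == k then b.2.1 * b.2.2 else 0) := by
  by_cases h : b.1 == k <;> simp [pvSum, List.filter_append, h]

lemma pvSum_eq_zero_of_not_mem (k : String) (l : List (String × Int × Int))
    (h : k ∉ l.map (·.1)) : pvSum k l = 0 := by
  have : l.filter (fun c => c.1 == k) = [] := by
    rw [List.filter_eq_nil_iff]
    intro c hc hck
    exact h (List.mem_map.2 ⟨c, hc, eq_of_beq hck⟩)
  simp [pvSum, this]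

lemma pvDedup_append_singleton (xs : List String) (x : String) :
    PySem.List.dedup (xs ++ [x]) = PySem.Set.add (PySem.List.dedup xs) x := by
  rw [PySem.List.dedup_eq_ofList, PySem.List.dedup_eq_ofList,
    PySem.Set.ofList_eq_foldl, PySem.Set.ofList_eq_foldl, List.foldl_append]
  rfl

lemma pvCanon_append_mem (l : List (String × Int × Int)) (b : String × Int × Int)
    (g : String → Int) (hmem : b.1 ∈ l.map (·.1)) :
    pvCanon (l ++ [b]) g = pvCanon l g := by
  unfold pvCanon
  rw [List.map_append, show List.map (·.1) [b] = [b.1] from rfl,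
    pvDedup_append_singleton,
    PySem.Set.add_of_mem ((PySem.List.mem_dedup _ _).2 hmem)]

lemma pvCanon_append_not_mem (l : List (String × Int × Int)) (b : String × Int × Int)
    (g : String → Int) (hmem : b.1 ∉ l.map (·.1)) :
    pvCanon (l ++ [b]) g = pvCanon l g ++ [(b.1, g b.1)] := by
  unfold pvCanon
  rw [List.map_append, show List.map (·.1) [b] = [b.1] from rfl,
    pvDedup_append_singleton,
    PySem.Set.add_of_not_mem (fun h => hmem ((PySem.List.mem_dedup _ _).1 h)),
    List.map_append]
  rfl

lemma pvCanon_congr (l : List (String × Int × Int)) (g g' : String → Int)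
    (h : ∀ k ∈ l.map (·.1), g k = g' k) : pvCanon l g = pvCanon l g' := by
  unfold pvCanon
  exact List.map_congr_left (fun k hk => by rw [h k ((PySem.List.mem_dedup _ _).1 hk)])

-- A's loop yields the canonical list valued by the per-date sums over the processed list
lemma pvA_items (l : List (String × Int × Int)) :
    (l.foldl
      (fun valores_por_data bloco_de_acao =>
        let data_de_compra := bloco_de_acao.1
        let valor_gasto_nesta_compra := bloco_de_acao.2.1 * bloco_de_acao.2.2
        if valores_por_data.contains data_de_compra then
          valores_por_data.insert data_de_compra
            (valores_por_data.getD data_de_compra 0 + valor_gasto_nesta_compra)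
        else
          valores_por_data.insert data_de_compra valor_gasto_nesta_compra)
      PySem.Dict.empty).items = pvCanon l (fun k => pvSum k l) := by
  induction l using List.reverseRecOn with
  | nil => rfl
  | append_singleton l b ih =>
    rw [List.foldl_append]
    set D := l.foldl
      (fun valores_por_data (bloco_de_acao : String × Int × Int) =>
        let data_de_compra := bloco_de_acao.1
        let valor_gasto_nesta_compra := bloco_de_acao.2.1 * bloco_de_acao.2.2
        if valores_por_data.contains data_de_compra then
          valores_por_data.insert data_de_compra
            (valores_por_data.getD data_de_compra 0 + valor_gasto_nesta_compra)
        else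
          valores_por_data.insert data_de_compra valor_gasto_nesta_compra)
      PySem.Dict.empty with hD
    have hkeys : D.keys = PySem.List.dedup (l.map (·.1)) := by
      rw [show D.keys = D.items.map (·.1) from rfl, ih, pvCanon_keys]
    have hnodup : D.keys.Nodup := by rw [hkeys]; exact PySem.List.nodup_dedup _
    by_cases hmem : b.1 ∈ l.map (·.1)
    · have hc : D.contains b.1 = true := by
        rw [PySem.Dict.contains_eq_decide_mem_keys, hkeys]
        simp only [decide_eq_true_eq, PySem.List.mem_dedup]
        exact hmem
      have hget : D.getD b.1 0 = pvSum b.1 l :=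
        PySem.Dict.getD_of_mem_items D
          (by rw [ih]; exact List.mem_map.2 ⟨b.1, (PySem.List.mem_dedup _ _).2 hmem, rfl⟩)
          hnodup 0
      simp only [List.foldl_cons, List.foldl_nil, hc, if_true]
      rw [PySem.Dict.items_insert_of_contains D _ hc, ih, hget,
        pvCanon_append_mem l b _ hmem]
      unfold pvCanon
      rw [List.map_map]
      apply List.map_congr_left
      intro k hk
      by_cases h : (k == b.1)
      · have hkb : k = b.1 := eq_of_beq h
        subst hkb
        simp [pvSum_append_singleton]
      · have hne : (b.1 == k) = false := by
          simp only [beq_eq_false_iff_ne]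
          exact fun e => h (by simp [e])
        simp [pvSum_append_singleton, hne]
        exact fun e => absurd e (by simpa using h)
    · have hc : D.contains b.1 = false := by
        rw [PySem.Dict.contains_eq_decide_mem_keys, hkeys]
        simp only [decide_eq_false_iff_not, PySem.List.mem_dedup]
        exact hmem
      simp only [List.foldl_cons, List.foldl_nil, hc, if_false, Bool.false_eq_true]
      rw [PySem.Dict.items_insert_of_not_contains D _ hc, ih,
        pvCanon_append_not_mem l b _ hmem]
      have hv : pvSum b.1 (l ++ [b]) = b.2.1 * b.2.2 := by
        rw [pvSum_append_singleton, pvSum_eq_zero_of_not_mem b.1 l hmem]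
        simp
      rw [hv]
      congr 1
      apply pvCanon_congr
      intro k hk
      have hne : (b.1 == k) = false := by
        simp only [beq_eq_false_iff_ne]
        exact fun e => hmem (e ▸ hk)
      rw [pvSum_append_singleton, hne]
      simp

-- B's loop (the inserted value depends only on the key) yields the canonical list valued by g
lemma pvB_items (g : String → Int) (l : List (String × Int × Int)) :
    (l.foldl (fun d (b : String × Int × Int) => d.insert b.1 (g b.1))
      PySem.Dict.empty).items = pvCanon l g := by
  induction l using List.reverseRecOn with
  | nil => rfl
  | append_singleton l b ih =>
    rw [List.foldl_append]
    set D := l.foldl (fun d (b : String × Int × Int) => d.insert b.1 (g b.1)) PySem.Dict.empty with hD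
    have hkeys : D.keys = PySem.List.dedup (l.map (·.1)) := by
      rw [show D.keys = D.items.map (·.1) from rfl, ih, pvCanon_keys]
    by_cases hmem : b.1 ∈ l.map (·.1)
    · have hc : D.contains b.1 = true := by
        rw [PySem.Dict.contains_eq_decide_mem_keys, hkeys]
        simp only [decide_eq_true_eq, PySem.List.mem_dedup]
        exact hmem
      simp only [List.foldl_cons, List.foldl_nil]
      rw [PySem.Dict.items_insert_of_contains D _ hc, ih, pvCanon_append_mem l b g hmem]
      refine (List.map_congr_left ?_).trans (List.map_id _)
      rintro p hp
      simp only [pvCanon, List.mem_map] at hp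
      obtain ⟨k, hk, rfl⟩ := hp
      by_cases h : (k == b.1) <;> simp [h]
      exact ⟨(eq_of_beq h).symm, by rw [eq_of_beq h]⟩
    · have hc : D.contains b.1 = false := by
        rw [PySem.Dict.contains_eq_decide_mem_keys, hkeys]
        simp only [decide_eq_false_iff_not, PySem.List.mem_dedup]
        exact hmem
      simp only [List.foldl_cons, List.foldl_nil]
      rw [PySem.Dict.items_insert_of_not_contains D _ hc, ih,
        pvCanon_append_not_mem l b g hmem]

lemma pvA_eq_canon (l : List (String × Int × Int)) :
    stockmarket l = pvCanon l (fun k => pvSum k l) := pvA_items l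

lemma pvB_eq_canon (l : List (String × Int × Int)) :
    stockmarket_alt l = pvCanon l (fun k => pvSum k l) := pvB_items (fun k => pvSum k l) l

-- ===== VERDICT (by name: the statement is the Claim_ definition above) =====
theorem stockmarket_spec : Claim_equal_stockmarket := by
  intro l _
  show stockmarket l = stockmarket_alt l
  rw [pvA_eq_canon, pvB_eq_canon]
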